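-- pv_equiv track=rewrite | github.com/SiddharthaBhattacharjee/DSA_Python | LeetCode_PracticeProblems/Easy/8_SumOfDigits.py | sumOfDigits2
-- ===== SOURCE A (Python) =====
-- def sumOfDigits2(x):
--     op = []
--     for i in x:
--         res=0
--         while i>0:
--             res = res+(i%10)
--             i = i//10
--         op.append(res)
--     return op
-- ===== SOURCE B (Python) =====
-- def sumOfDigits2(x):
--     return [sum(int(c) for c in str(i)) if i > 0 else 0 for i in x]
-- ===== Notes on version B (the rewrite author's own statement) =====
-- stated objective: idiomatic
-- what changed: Replaces the explicit accumulator loops (while-loop mod/floordiv digit extraction appended into an output list) by a single list comprehension that sums the decimal characters of str(i), keeping A's 0 for non-positive entries.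
import Mathlib
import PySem

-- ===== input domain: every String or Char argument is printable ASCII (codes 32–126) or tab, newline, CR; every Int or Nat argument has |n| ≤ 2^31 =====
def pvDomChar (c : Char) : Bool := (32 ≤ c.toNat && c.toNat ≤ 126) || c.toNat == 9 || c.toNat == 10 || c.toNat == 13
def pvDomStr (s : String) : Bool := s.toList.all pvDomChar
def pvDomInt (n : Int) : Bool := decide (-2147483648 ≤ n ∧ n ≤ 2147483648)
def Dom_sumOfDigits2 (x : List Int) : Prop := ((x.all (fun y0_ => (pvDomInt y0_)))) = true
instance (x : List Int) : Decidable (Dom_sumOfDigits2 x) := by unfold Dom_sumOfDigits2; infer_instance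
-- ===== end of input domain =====

-- B replaces A's while-loop mod/floordiv digit extraction with an idiomatic
-- comprehension summing the decimal characters of str(i) (0 for non-positive i).


-- ===== PORT A =====
-- the inner 'while i>0: res += i%10; i //= 10' loop of A
def pvDigitLoop (i res : Int) : Int :=
  if _h : 0 < i then
    pvDigitLoop (PySem.Int.floordiv i 10) (res + PySem.Int.mod i 10)
  else res
termination_by i.toNat
decreasing_by
  have h10 : PySem.Int.floordiv i 10 = i / 10 := PySem.Int.floordiv_eq_ediv_of_pos (by omega)
  rw [h10]; omega

def sumOfDigits2 (x : List Int) : List Int :=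
  x.foldl (fun op i => op ++ [pvDigitLoop i 0]) []

-- ===== PORT B =====
-- int(c) for a single character c
def pvIntOfChar (c : Char) : Int := (PySem.Int.ofChars? [c]).getD 0

def sumOfDigits2_alt (x : List Int) : List Int :=
  x.map (fun i =>
    if 0 < i then ((PySem.Int.toChars i).map pvIntOfChar).sum else 0)

-- ===== PRECONDITION & SPEC =====
def Spec_sumOfDigits2 (x : List Int) (out : List Int) : Prop := out = sumOfDigits2_alt x
instance (x : List Int) (out : List Int) : Decidable (Spec_sumOfDigits2 x out) := by unfold Spec_sumOfDigits2; infer_instance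

-- ===== CLAIM (what is proved, stated in full; the proofs are below) =====
def Claim_equal_sumOfDigits2 : Prop := ∀ (x : List Int), Dom_sumOfDigits2 x → Spec_sumOfDigits2 x (sumOfDigits2 x)

-- ===== LEMMAS AND PROOFS =====

-- digit sum of a Nat, peeling the low digit
def pvDsum (n : Nat) : Nat :=
  if n = 0 then 0 else n % 10 + pvDsum (n / 10)
decreasing_by omega

lemma pvIntOfChar_digitChar (d : Nat) (hd : d < 10) :
    pvIntOfChar (Nat.digitChar d) = (d : Int) := by
  interval_cases d <;> decide

lemma pvDsum_core (fuel : Nat) :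
    ∀ (n : Nat) (ds : List Char), n < fuel →
      ((Nat.toDigitsCore 10 fuel n ds).map pvIntOfChar).sum
        = (pvDsum n : Int) + ((ds.map pvIntOfChar).sum) := by
  induction fuel with
  | zero => intro n ds h; omega
  | succ fuel ih =>
    intro n ds h
    rw [Nat.toDigitsCore]
    by_cases h0 : n / 10 = 0
    · simp only [h0, if_true, List.map_cons, List.sum_cons]
      rw [pvIntOfChar_digitChar (n % 10) (Nat.mod_lt _ (by norm_num)),
        pvDsum]
      split_ifs with hn
      · subst hn; simp
      · rw [pvDsum, if_pos h0]
        push_cast; ring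
    · rw [if_neg h0, ih (n / 10) _ (by omega)]
      simp only [List.map_cons, List.sum_cons]
      rw [pvIntOfChar_digitChar (n % 10) (Nat.mod_lt _ (by norm_num))]
      conv_rhs => rw [pvDsum, if_neg (by omega)]
      push_cast; ring

lemma pvDigitLoop_eq_aux (k : Nat) :
    ∀ (i res : Int), i.toNat ≤ k →
      pvDigitLoop i res = res + (pvDsum i.toNat : Int) := by
  induction k with
  | zero =>
    intro i res hk
    rw [pvDigitLoop, dif_neg (by omega)]
    have : i.toNat = 0 := by omega
    rw [this, pvDsum]; simp
  | succ k ih =>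
    intro i res hk
    rw [pvDigitLoop]
    split_ifs with h
    · have hfd : PySem.Int.floordiv i 10 = i / 10 :=
        PySem.Int.floordiv_eq_ediv_of_pos (by omega)
      have hmd : PySem.Int.mod i 10 = i % 10 :=
        PySem.Int.mod_eq_emod_of_pos (by omega)
      rw [hfd, hmd, ih (i / 10) _ (by omega)]
      conv_rhs => rw [pvDsum, if_neg (by omega)]
      have h1 : (i / 10).toNat = i.toNat / 10 := by omega
      have h2 : (i % 10) = ((i.toNat % 10 : Nat) : Int) := by omega
      rw [h1, h2]
      push_cast; ring
    · have : i.toNat = 0 := by omega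
      rw [this, pvDsum]; simp

lemma pvDigitLoop_eq (i res : Int) :
    pvDigitLoop i res = res + (pvDsum i.toNat : Int) :=
  pvDigitLoop_eq_aux i.toNat i res le_rfl

-- ===== VERDICT (by name: the statement is the Claim_ definition above) =====
theorem sumOfDigits2_spec : Claim_equal_sumOfDigits2 := by
  intro x _
  unfold Spec_sumOfDigits2 sumOfDigits2 sumOfDigits2_alt
  rw [PySem.List.foldl_append_singleton_eq_map]
  apply List.map_congr_left
  intro i _
  by_cases h : 0 < i
  · rw [if_pos h, pvDigitLoop_eq i 0]
    unfold PySem.Int.toChars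
    rw [if_neg (by omega), Nat.toDigits]
    rw [pvDsum_core (i.toNat + 1) i.toNat [] (by omega)]
    simp
  · rw [if_neg h, pvDigitLoop, dif_neg h]
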